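-- pv_equiv track=rewrite | github.com/Project-ntub/project113209 | app113209/backend/api_views.py | get_select_related_fields
-- ===== SOURCE A (Python) =====
-- def get_select_related_fields(field_name):
--     if not field_name or not isinstance(field_name, str):
--         return []
--     parts = field_name.split('__')
--     if len(parts) > 1:
--         # 傳回所有關聯欄位的路徑
--         return ['__'.join(parts[:i]) for i in range(1, len(parts))]
--     else:
--         return []
-- ===== SOURCE B (Python) =====
-- def get_select_related_fields(field_name):
--     if not field_name or not isinstance(field_name, str):
--         return []
--     parts = field_name.split('__')
--     if len(parts) <= 1:
--         return []
--     prefix = parts[0]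
--     result = [prefix]
--     for part in parts[1:-1]:
--         prefix = prefix + '__' + part
--         result.append(prefix)
--     return result
-- ===== Notes on version B (the rewrite author's own statement) =====
-- stated objective: alternative
-- what changed: Replaces the comprehension that independently re-slices and re-joins parts[:i] for every i with a single loop maintaining a running prefix string that is extended and appended once per part (O(k) string work in the number of parts instead of O(k^2)).
import Mathlib
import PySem

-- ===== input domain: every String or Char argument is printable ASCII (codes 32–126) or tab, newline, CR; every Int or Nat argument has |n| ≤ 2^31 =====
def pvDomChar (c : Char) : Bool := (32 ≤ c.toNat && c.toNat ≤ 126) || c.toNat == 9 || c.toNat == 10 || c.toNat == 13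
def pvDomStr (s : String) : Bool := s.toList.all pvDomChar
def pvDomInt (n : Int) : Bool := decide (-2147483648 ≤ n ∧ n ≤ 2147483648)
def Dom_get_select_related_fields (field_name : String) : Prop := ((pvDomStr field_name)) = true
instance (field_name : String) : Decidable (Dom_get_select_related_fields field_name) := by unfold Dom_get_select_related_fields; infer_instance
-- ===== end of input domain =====

-- B replaces A's per-index re-slice-and-join comprehension by a single running-prefix
-- accumulator loop that extends the previous prefix once per part (objective: alternative).

-- ===== PORT A =====
-- return ['__'.join(parts[:i]) for i in range(1, len(parts))]
def get_select_related_fields (field_name : String) : List String :=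
  if field_name = "" then []
  else
    let parts := (PySem.Str.split? field_name "__").getD []
    if 1 < parts.length then
      (PySem.List.pyRange 1 (parts.length : Int) 1).map
        (fun i => PySem.Str.join "__" (PySem.List.slice parts none (some i)))
    else []

-- ===== PORT B =====
-- the loop: for part in tail: prefix = prefix + '__' + part; result.append(prefix)
def pvBLoop (result : List String) (prefix_ : String) (rest : List String) : List String :=
  match rest with
  | [] => result
  | part :: rest' => pvBLoop (result ++ [prefix_ ++ "__" ++ part]) (prefix_ ++ "__" ++ part) rest'

def get_select_related_fields_alt (field_name : String) : List String :=
  if field_name = "" then []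
  else
    let parts := (PySem.Str.split? field_name "__").getD []
    if parts.length ≤ 1 then []
    else
      let prefix_ := PySem.List.pyGetD parts 0 ""
      pvBLoop [prefix_] prefix_ (PySem.List.slice parts (some 1) (some (-1)))

-- ===== PRECONDITION & SPEC =====
def Spec_get_select_related_fields (field_name : String) (out : List String) : Prop := out = get_select_related_fields_alt field_name
instance (field_name : String) (out : List String) : Decidable (Spec_get_select_related_fields field_name out) := by unfold Spec_get_select_related_fields; infer_instance

-- ===== CLAIM (what is proved, stated in full; the proofs are below) =====
def Claim_equal_get_select_related_fields : Prop := ∀ (field_name : String), Dom_get_select_related_fields field_name → Spec_get_select_related_fields field_name (get_select_related_fields field_name)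

-- ===== LEMMAS AND PROOFS =====

-- incremental prefixes of B, as a pure function of the starting prefix and the tail list
def pvPrefixJoins (pre : String) (l : List String) : List String :=
  match l with
  | [] => []
  | x :: xs => (pre ++ "__" ++ x) :: pvPrefixJoins (pre ++ "__" ++ x) xs

theorem pvStr_ext (s t : String) (h : s.toList = t.toList) : s = t := by
  have := congrArg String.ofList h; simpa using this

theorem pvJoin_singleton (x : String) : PySem.Str.join "__" [x] = x := by
  apply pvStr_ext
  simp [PySem.Str.toList_join, PySem.Chars.join_singleton]

theorem pvJoin_merge (x y : String) (l : List String) :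
    PySem.Str.join "__" ((x ++ "__" ++ y) :: l) = PySem.Str.join "__" (x :: y :: l) := by
  apply pvStr_ext
  cases l with
  | nil =>
    simp [PySem.Str.toList_join, PySem.Chars.join_singleton, PySem.Chars.join_cons_cons]
  | cons r rs =>
    simp [PySem.Str.toList_join, PySem.Chars.join_cons_cons]

theorem pvBLoop_eq (rest : List String) (res : List String) (pre : String) :
    pvBLoop res pre rest = res ++ pvPrefixJoins pre rest := by
  induction rest generalizing res pre with
  | nil => simp [pvBLoop, pvPrefixJoins]
  | cons x xs ih => simp [pvBLoop, pvPrefixJoins, ih]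

theorem pvPrefixJoins_eq (rest : List String) (pre : String) :
    pvPrefixJoins pre rest =
      (List.range rest.length).map
        (fun j => PySem.Str.join "__" (pre :: rest.take (j + 1))) := by
  induction rest generalizing pre with
  | nil => simp [pvPrefixJoins]
  | cons x xs ih =>
    simp only [pvPrefixJoins, List.length_cons, List.range_succ_eq_map, List.map_cons,
      List.map_map, ih]
    congr 1
    · rw [show (x :: xs).take (0 + 1) = [x] from rfl, ← pvJoin_merge, pvJoin_singleton]
    · apply List.map_congr_left
      intro j _
      simp only [Function.comp]
      rw [show (x :: xs).take (Nat.succ j + 1) = x :: xs.take (j + 1) by simp [Nat.succ_eq_add_one]]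
      rw [pvJoin_merge]

-- the whole comparison, generic in the split result
theorem pvMain (parts : List String) :
    (if 1 < parts.length then
      (PySem.List.pyRange 1 (parts.length : Int) 1).map
        (fun i => PySem.Str.join "__" (PySem.List.slice parts none (some i)))
     else []) =
    (if parts.length ≤ 1 then []
     else
      pvBLoop [PySem.List.pyGetD parts 0 ""] (PySem.List.pyGetD parts 0 "")
        (PySem.List.slice parts (some 1) (some (-1)))) := by
  by_cases h : 1 < parts.length
  · rw [if_pos h, if_neg (by omega)]
    obtain ⟨p, rest, rfl⟩ : ∃ p rest, parts = p :: rest := by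
      cases parts with
      | nil => simp at h
      | cons p rest => exact ⟨p, rest, rfl⟩
    have hm : 1 ≤ rest.length := by simpa using h
    have hp0 : PySem.List.pyGetD (p :: rest) 0 "" = p := by
      simp [PySem.List.pyGetD, PySem.List.pyIdx?, PySem.List.pyGet?]
    have hslice : PySem.List.slice (p :: rest) (some 1) (some (-1)) =
        rest.take (rest.length - 1) := by
      simp only [PySem.List.slice, PySem.List.clampIdx, List.length_cons]
      norm_num
      split_ifs <;> omega
    rw [hp0, hslice, pvBLoop_eq, pvPrefixJoins_eq]
    -- A side: turn pyRange into List.range and the slices into takes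
    rw [PySem.List.pyRange_one]
    have hlen : (((p :: rest).length : Int) - 1).toNat = rest.length := by
      simp
    rw [hlen]
    -- both sides are now maps over ranges; peel the head of A's range
    obtain ⟨m, hm'⟩ : ∃ m, rest.length = m + 1 := ⟨rest.length - 1, by omega⟩
    simp only [hm', Nat.add_sub_cancel, List.length_take, min_eq_left (Nat.le_succ m)]
    rw [List.range_succ_eq_map, List.map_cons, List.map_cons, List.map_map]
    have hA0 : PySem.Str.join "__" (PySem.List.slice (p :: rest) none (some (1 + ((0 : Nat) : Int)))) = p := by
      have : ((1 : Int) + ((0 : Nat) : Int)) = ((1 : Nat) : Int) := by norm_num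
      rw [this, PySem.List.slice_to_natCast]
      simpa using pvJoin_singleton p
    rw [hA0]
    congr 1
    simp only [List.map_map]
    apply List.map_congr_left
    intro j hj
    have hj' : j < m := List.mem_range.mp hj
    simp only [Function.comp]
    have hc : ((1 : Int) + (Nat.succ j : Nat)) = ((j + 2 : Nat) : Int) := by push_cast; ring
    rw [hc, PySem.List.slice_to_natCast]
    have htake : (p :: rest).take (j + 2) = p :: rest.take (j + 1) := by simp
    have htake2 : (rest.take m).take (j + 1) = rest.take (j + 1) := by
      rw [List.take_take]; congr 1; omega
    rw [htake, htake2]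
  · rw [if_neg h, if_pos (by omega)]

-- ===== VERDICT (by name: the statement is the Claim_ definition above) =====
theorem get_select_related_fields_spec : Claim_equal_get_select_related_fields := by
  intro field_name _
  unfold Spec_get_select_related_fields get_select_related_fields get_select_related_fields_alt
  by_cases h : field_name = ""
  · simp [h]
  · rw [if_neg h, if_neg h]
    exact pvMain _
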